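-- pv_equiv track=rewrite | github.com/semajyllek/lstar | lstar/tests/test_learner.py | membership_query
-- ===== SOURCE A (Python) =====
-- def membership_query(string):
--     tokens = string.split()
--     count = 0
--     for token in tokens:
--         if token == 'a':
--             count += 1
--             if count >= 3:
--                 return False
--         else:
--             count = 0
--     return True
-- ===== SOURCE B (Python) =====
-- def membership_query(string):
--     # group the tokens into maximal runs of equal consecutive tokens,
--     # then test each run: an 'a'-run of length >= 3 fails
--     tokens = string.split()
--     i = 0
--     n = len(tokens)
--     while i < n:
--         j = i
--         while j < n and tokens[j] == tokens[i]:
--             j += 1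
--         if tokens[i] == 'a' and j - i >= 3:
--             return False
--         i = j
--     return True
-- ===== Notes on version B (the rewrite author's own statement) =====
-- stated objective: alternative
-- what changed: Replaces the running-counter-with-reset scan by a group-then-measure pass: tokens are partitioned into maximal runs of equal consecutive tokens and each 'a'-run's length is tested against 3.
import Mathlib
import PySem

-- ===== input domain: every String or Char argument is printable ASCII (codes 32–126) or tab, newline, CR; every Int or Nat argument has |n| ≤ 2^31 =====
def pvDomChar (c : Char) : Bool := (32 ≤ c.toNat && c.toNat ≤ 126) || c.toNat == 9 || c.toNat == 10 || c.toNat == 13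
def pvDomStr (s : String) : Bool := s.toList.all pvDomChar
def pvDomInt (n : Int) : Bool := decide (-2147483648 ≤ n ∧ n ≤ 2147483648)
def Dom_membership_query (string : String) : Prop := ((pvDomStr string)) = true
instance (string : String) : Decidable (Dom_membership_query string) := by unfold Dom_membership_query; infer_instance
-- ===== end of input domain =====

-- B replaces A's running counter by grouping tokens into maximal equal runs and measuring each run; alternative decomposition, same cost.


-- ===== PORT A =====
-- A's loop: running count of consecutive 'a' tokens, reset on any other token
def mqLoopA : List String → Nat → Bool
  | [], _ => true
  | t :: ts, count =>
      if t == "a" then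
        if 3 ≤ count + 1 then false else mqLoopA ts (count + 1)
      else mqLoopA ts 0

def membership_query (string : String) : Bool :=
  mqLoopA (PySem.Str.split₀ string) 0

-- ===== PORT B =====
-- B's loop: peel off the maximal run of tokens equal to the first one, test the run
def mqLoopB : List String → Bool
  | [] => true
  | t :: ts =>
      let run := ts.takeWhile (· == t)
      if t == "a" && 3 ≤ run.length + 1 then false
      else mqLoopB (ts.dropWhile (· == t))
termination_by l => l.length
decreasing_by
  simpa using Nat.lt_succ_of_le (List.length_dropWhile_le _ _)

def membership_query_alt (string : String) : Bool :=
  mqLoopB (PySem.Str.split₀ string)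

-- ===== PRECONDITION & SPEC =====
def Spec_membership_query (string : String) (out : Bool) : Prop := out = membership_query_alt string
instance (string : String) (out : Bool) : Decidable (Spec_membership_query string out) := by unfold Spec_membership_query; infer_instance

-- ===== CLAIM (what is proved, stated in full; the proofs are below) =====
def Claim_equal_membership_query : Prop := ∀ (string : String), Dom_membership_query string → Spec_membership_query string (membership_query string)

-- ===== LEMMAS AND PROOFS =====

-- Running A's loop through m consecutive 'a' tokens (counter below 3)
lemma mqLoopA_replicate (m : Nat) (rest : List String) (c : Nat) (hc : c < 3) :
    mqLoopA (List.replicate m "a" ++ rest) c =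
      if 3 ≤ c + m then false else mqLoopA rest (c + m) := by
  induction m generalizing c with
  | zero => simp [Nat.not_le.mpr hc]
  | succ k ih =>
      simp only [List.replicate_succ, List.cons_append, mqLoopA, beq_self_eq_true, if_true]
      by_cases h3 : 3 ≤ c + 1
      · have h3' : 3 ≤ c + (k + 1) := by omega
        simp [h3, h3']
      · rw [if_neg h3, ih _ (by omega), show c + 1 + k = c + (k + 1) by omega]

-- Running A's loop through a block of non-'a' tokens from counter 0
lemma mqLoopA_skipAll (run rest : List String) (h : ∀ x ∈ run, ¬ x = "a") :
    mqLoopA (run ++ rest) 0 = mqLoopA rest 0 := by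
  induction run with
  | nil => rfl
  | cons x xs ih =>
      have hx : ¬ x = "a" := h x (by simp)
      simp only [List.cons_append, mqLoopA, beq_iff_eq, if_neg hx]
      exact ih (fun y hy => h y (by simp [hy]))

-- From a counter < 3, A's loop gives the same answer as from counter 0
-- when the list is empty or starts with a non-'a' token
lemma mqLoopA_reset (rest : List String) (c : Nat)
    (h : rest = [] ∨ ∃ r rs, rest = r :: rs ∧ ¬ r = "a") :
    mqLoopA rest c = mqLoopA rest 0 := by
  rcases h with h | ⟨r, rs, rfl, hr⟩
  · subst h; rfl
  · simp [mqLoopA, beq_iff_eq, hr]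

lemma mqLoopB_eq_loopA : ∀ (n : Nat) (l : List String), l.length ≤ n → mqLoopB l = mqLoopA l 0 := by
  intro n
  induction n with
  | zero =>
      intro l hl
      rw [List.length_eq_zero_iff.mp (Nat.le_zero.mp hl), mqLoopB, mqLoopA]
  | succ n ih =>
      intro l hl
      cases l with
      | nil => rw [mqLoopB, mqLoopA]
      | cons t ts =>
          have hsplit : ts.takeWhile (· == t) ++ ts.dropWhile (· == t) = ts :=
            List.takeWhile_append_dropWhile
          have hrun : ∀ x ∈ ts.takeWhile (· == t), x = t := by
            intro x hx
            simpa using List.mem_takeWhile_imp hx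
          have hlen : (ts.dropWhile (· == t)).length ≤ n := by
            have := List.length_dropWhile_le (· == t) ts
            simp at hl
            omega
          have hrest : ts.dropWhile (· == t) = [] ∨
              ∃ r rs, ts.dropWhile (· == t) = r :: rs ∧ ¬ r = t := by
            cases hd : ts.dropWhile (· == t) with
            | nil => exact Or.inl rfl
            | cons r rs =>
                refine Or.inr ⟨r, rs, rfl, ?_⟩
                have := List.head?_dropWhile_not (· == t) ts
                rw [hd] at this
                simpa using this
          rw [mqLoopB]
          by_cases ht : t = "a"
          · subst ht
            have hrep : ts.takeWhile (· == "a")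
                = List.replicate (ts.takeWhile (· == "a")).length "a" :=
              List.eq_replicate_of_mem hrun
            have hA : mqLoopA ("a" :: ts) 0 =
                mqLoopA (List.replicate ((ts.takeWhile (· == "a")).length + 1) "a"
                  ++ ts.dropWhile (· == "a")) 0 := by
              rw [List.replicate_succ, List.cons_append]
              conv_lhs => rw [← hsplit, hrep]
            by_cases hm : 3 ≤ (ts.takeWhile (· == "a")).length + 1
            · rw [if_pos (by simp [hm]), hA, mqLoopA_replicate _ _ 0 (by omega),
                  if_pos (by omega)]
            · have hrest' : ts.dropWhile (· == "a") = [] ∨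
                  ∃ r rs, ts.dropWhile (· == "a") = r :: rs ∧ ¬ r = "a" := hrest
              rw [if_neg (by simp [hm]), hA, mqLoopA_replicate _ _ 0 (by omega),
                  if_neg (by omega), ih _ hlen]
              exact (mqLoopA_reset _ _ hrest').symm
          · have hA : mqLoopA (t :: ts) 0 = mqLoopA (ts.dropWhile (· == t)) 0 := by
              have : mqLoopA (t :: ts) 0
                  = mqLoopA ((t :: ts.takeWhile (· == t)) ++ ts.dropWhile (· == t)) 0 := by
                rw [List.cons_append, hsplit]
              rw [this]
              exact mqLoopA_skipAll _ _ (by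
                intro x hx
                rcases List.mem_cons.mp hx with rfl | hx'
                · exact ht
                · rw [hrun x hx']; exact ht)
            rw [if_neg (by simp [ht]), hA, ih _ hlen]

-- ===== VERDICT (by name: the statement is the Claim_ definition above) =====
theorem membership_query_spec : Claim_equal_membership_query := by
  intro s _
  unfold Spec_membership_query membership_query membership_query_alt
  exact (mqLoopB_eq_loopA _ _ le_rfl).symm
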